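-- pv_equiv track=rewrite | github.com/pypi-data/pypi-mirror-376 | packages/montmark/montmark-0.0.1-py3-none-any.whl/montmark/montmark.py | check_hr
-- ===== SOURCE A (Python) =====
-- def check_hr(md: str, start = 0):
--     """Dedicated detection of horizontal rule."""
--     toks = ''
--     i = start
--     c = md.find('\n', i)
--     eol = c if c != -1 else len(md)
--     while i < eol:
--         if not toks:
--             if md[i] in '*_-':
--                 toks = md[i]
--             elif md[i] == ' ':
--                 pass
--             else:
--                 return False, -1
--             i += 1
--             continue
--         if md[i] != ' ' and md[i] != toks[0]:
--             return False, -1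
--         elif md[i] in toks:
--             toks += md[i]
--         elif md[i] == ' ':
--             pass
--         i += 1
--     res = True if len(toks) >= 3 else False
--     #c = md.find('\n', i)
--     #eol = c if c != -1 else len(md)
--     return res, eol
-- ===== SOURCE B (Python) =====
-- def check_hr(md: str, start = 0):
--     """Dedicated detection of horizontal rule."""
--     c = md.find('\n', start)
--     eol = c if c != -1 else len(md)
--     line = md[start:eol]
--     chars = set(line)
--     chars.discard(' ')
--     if not chars:
--         return False, eol
--     if len(chars) != 1:
--         return False, -1
--     ch = next(iter(chars))
--     if ch not in '*_-':
--         return False, -1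
--     return line.count(ch) >= 3, eol
-- ===== Notes on version B (the rewrite author's own statement) =====
-- stated objective: simpler
-- what changed: Replaces A's sequential token-accumulating state machine over character indices with a whole-line view: slice the line, build the set of its distinct non-space characters, and decide by the set's cardinality and one count of the lone character.
-- outside the precondition, e.g. on check_hr('--', -2): A returns (True, 2), B returns (False, 2)
import Mathlib
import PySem

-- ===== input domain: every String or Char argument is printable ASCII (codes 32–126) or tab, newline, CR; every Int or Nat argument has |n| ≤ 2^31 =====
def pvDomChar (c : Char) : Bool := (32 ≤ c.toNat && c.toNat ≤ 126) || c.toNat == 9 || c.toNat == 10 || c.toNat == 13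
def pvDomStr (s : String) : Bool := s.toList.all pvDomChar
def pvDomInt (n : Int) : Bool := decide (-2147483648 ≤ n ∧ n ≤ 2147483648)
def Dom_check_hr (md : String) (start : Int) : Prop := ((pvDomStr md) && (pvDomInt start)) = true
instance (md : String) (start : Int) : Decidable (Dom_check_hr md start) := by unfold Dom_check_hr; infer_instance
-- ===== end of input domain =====

-- B replaces A's token-accumulating index state machine by a set-of-distinct-characters
-- view of the sliced line (objective: simpler); equivalence is claimed for 0 ≤ start.

-- ===== PORT A =====
-- the 'while i < eol' loop of A: fuel = number of remaining iterations (eol - i)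
def checkHrLoopA (cs : List Char) (eol : Int) : Nat → Int → List Char → Bool × Int
  | 0, _, toks => (decide (3 ≤ toks.length), eol)
  | fuel + 1, i, toks =>
    let ch := PySem.List.pyGetD cs i ' '      -- md[i]; in range for every admitted input
    match toks with
    | [] =>
      if ch = '*' ∨ ch = '_' ∨ ch = '-' then checkHrLoopA cs eol fuel (i + 1) [ch]
      else if ch = ' ' then checkHrLoopA cs eol fuel (i + 1) []
      else (false, -1)
    | t0 :: _ =>
      if ch ≠ ' ' ∧ ch ≠ t0 then (false, -1)
      else if ch ∈ toks then checkHrLoopA cs eol fuel (i + 1) (toks ++ [ch])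
      else if ch = ' ' then checkHrLoopA cs eol fuel (i + 1) toks
      else checkHrLoopA cs eol fuel (i + 1) toks

def check_hr (md : String) (start : Int) : Bool × Int :=
  let c := PySem.Str.findFrom md "\n" start
  let eol := if c ≠ -1 then c else PySem.Str.len md
  checkHrLoopA md.toList eol (eol - start).toNat start []

-- ===== PORT B =====
def check_hr_alt (md : String) (start : Int) : Bool × Int :=
  let c := PySem.Str.findFrom md "\n" start
  let eol := if c ≠ -1 then c else PySem.Str.len md
  let line := PySem.List.slice md.toList (some start) (some eol)
  let chars := PySem.Set.discard (PySem.Set.ofList line) ' '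
  match chars with
  | [] => (false, eol)
  | [ch] =>
    if ch = '*' ∨ ch = '_' ∨ ch = '-' then (decide (3 ≤ line.count ch), eol)
    else (false, -1)
  | _ => (false, -1)

-- ===== PRECONDITION & SPEC =====
-- Pre_ excludes negative start, which is outside the natural domain of this line scanner:
-- there Python's negative indexing makes A read a wrapped-around suffix and then the line
-- again from index 0 (or raise IndexError when start < -len(md)), while B's slice reads the suffix once.
def Pre_check_hr (md : String) (start : Int) : Prop := 0 ≤ start
instance (md : String) (start : Int) : Decidable (Pre_check_hr md start) := by unfold Pre_check_hr; infer_instance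
def pvWitness_check_hr : String × Int := (" ---", 0)
def Spec_check_hr (md : String) (start : Int) (out : Bool × Int) : Prop := out = check_hr_alt md start
instance (md : String) (start : Int) (out : Bool × Int) : Decidable (Spec_check_hr md start out) := by unfold Spec_check_hr; infer_instance

-- ===== CLAIM (what is proved, stated in full; the proofs are below) =====
def Claim_equal_check_hr : Prop := ∀ (md : String) (start : Int), Dom_check_hr md start → Pre_check_hr md start → Spec_check_hr md start (check_hr md start)

-- ===== LEMMAS AND PROOFS =====

-- proof-side form of A's loop: structural recursion over the characters of the line
def listLoop (eol : Int) : List Char → List Char → Bool × Int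
  | [], toks => (decide (3 ≤ toks.length), eol)
  | ch :: rest, toks =>
    match toks with
    | [] =>
      if ch = '*' ∨ ch = '_' ∨ ch = '-' then listLoop eol rest [ch]
      else if ch = ' ' then listLoop eol rest []
      else (false, -1)
    | t0 :: _ =>
      if ch ≠ ' ' ∧ ch ≠ t0 then (false, -1)
      else if ch ∈ toks then listLoop eol rest (toks ++ [ch])
      else if ch = ' ' then listLoop eol rest toks
      else listLoop eol rest toks

lemma loopA_eq_listLoop (cs : List Char) (eol : Int) :
    ∀ (fuel : Nat) (i : Int) (toks : List Char), 0 ≤ i → i.toNat + fuel ≤ cs.length →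
      checkHrLoopA cs eol fuel i toks = listLoop eol ((cs.drop i.toNat).take fuel) toks := by
  intro fuel
  induction fuel with
  | zero => intro i toks _ _; simp [checkHrLoopA, listLoop]
  | succ f ih =>
    intro i toks hi hlen
    have hlt : i.toNat < cs.length := by omega
    have hdrop : cs.drop i.toNat = cs[i.toNat] :: cs.drop (i.toNat + 1) :=
      List.drop_eq_getElem_cons hlt
    have hget : PySem.List.pyGetD cs i ' ' = cs[i.toNat] :=
      PySem.List.pyGetD_eq_getElem cs ' ' hi (by omega)
    have hnext : (i + 1).toNat = i.toNat + 1 := by omega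
    have hrec : ∀ toks', checkHrLoopA cs eol f (i + 1) toks'
        = listLoop eol ((cs.drop (i.toNat + 1)).take f) toks' := by
      intro toks'
      rw [ih (i + 1) toks' (by omega) (by omega), hnext]
    rw [hdrop]
    show checkHrLoopA cs eol (f + 1) i toks = _
    simp only [checkHrLoopA, listLoop, hget, List.take_succ_cons]
    cases toks with
    | nil => split_ifs <;> simp [hrec]
    | cons t0 ts => split_ifs <;> simp [hrec]

lemma listLoop_spaces (eol : Int) (sp m : List Char) (hsp : ∀ x ∈ sp, x = ' ') :
    listLoop eol (sp ++ m) [] = listLoop eol m [] := by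
  induction sp with
  | nil => rfl
  | cons x xs ih =>
    have hx : x = ' ' := hsp x (by simp)
    have h1 : listLoop eol ((x :: xs) ++ m) [] = listLoop eol (xs ++ m) [] := by
      simp [listLoop, hx]
    rw [h1, ih (fun y hy => hsp y (by simp [hy]))]

lemma listLoop_repl (eol : Int) (c : Char) (hc : c ≠ ' ') :
    ∀ (l : List Char) (k : Nat), 1 ≤ k →
      listLoop eol l (List.replicate k c)
        = if (∀ y ∈ l, y = ' ' ∨ y = c) then (decide (3 ≤ k + l.count c), eol) else (false, -1) := by
  intro l
  induction l with
  | nil => intro k hk; simp [listLoop]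
  | cons x rest ih =>
    intro k hk
    obtain ⟨k', rfl⟩ : ∃ k', k = k' + 1 := ⟨k - 1, by omega⟩
    rw [List.replicate_succ]
    show listLoop eol (x :: rest) (c :: List.replicate k' c) = _
    by_cases hx : x = c
    · subst hx
      have happ : x :: List.replicate k' x ++ [x] = List.replicate (k' + 1 + 1) x := by
        rw [List.replicate_succ' (n := k' + 1), List.replicate_succ]
      have h1 : listLoop eol (x :: rest) (x :: List.replicate k' x)
          = listLoop eol rest (List.replicate (k' + 1 + 1) x) := by
        simp only [listLoop]
        rw [if_neg (by simp), if_pos (by simp), happ]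
      rw [h1, ih (k' + 1 + 1) (by omega)]
      by_cases hall : ∀ y ∈ rest, y = ' ' ∨ y = x
      · rw [if_pos hall, if_pos (by
          intro y hy
          rcases List.mem_cons.mp hy with h | h
          · right; exact h
          · exact hall y h)]
        rw [List.count_cons_self]
        congr 1
        rw [decide_eq_decide]
        omega
      · rw [if_neg hall, if_neg (by
          intro h
          exact hall (fun y hy => h y (List.mem_cons_of_mem x hy)))]
    · by_cases hs : x = ' '
      · subst hs
        have hmem : ¬ (' ' ∈ c :: List.replicate k' c) := by
          intro h
          rcases List.mem_cons.mp h with h | h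
          · exact hc h.symm
          · exact hc ((List.eq_of_mem_replicate h).symm)
        have h1 : listLoop eol (' ' :: rest) (c :: List.replicate k' c)
            = listLoop eol rest (c :: List.replicate k' c) := by
          simp only [listLoop]
          rw [if_neg (by simp), if_neg hmem]
          simp
        rw [h1, ← List.replicate_succ, ih (k' + 1) hk]
        have hcnt : (' ' :: rest).count c = rest.count c := by
          simp [Ne.symm hc]
        by_cases hall : ∀ y ∈ rest, y = ' ' ∨ y = c
        · rw [if_pos hall, if_pos (by
            intro y hy
            rcases List.mem_cons.mp hy with h | h
            · left; exact h
            · exact hall y h), hcnt]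
        · rw [if_neg hall, if_neg (by
            intro h
            exact hall (fun y hy => h y (List.mem_cons_of_mem ' ' hy)))]
      · have h1 : listLoop eol (x :: rest) (c :: List.replicate k' c) = (false, -1) := by
          simp only [listLoop]
          rw [if_pos ⟨hs, hx⟩]
        rw [h1, if_neg (by
          intro h
          rcases h x (by simp) with h' | h'
          · exact hs h'
          · exact hx h')]

lemma nodup_singleton_of_all_eq {s : List Char} (hnd : s.Nodup) (c : Char)
    (hc : c ∈ s) (hall : ∀ y ∈ s, y = c) : s = [c] := by
  cases s with
  | nil => cases hc
  | cons a t =>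
    have ha : a = c := hall a (by simp)
    subst ha
    cases t with
    | nil => rfl
    | cons b u =>
      have hb : b = a := hall b (by simp)
      simp [hb] at hnd

lemma exists_first_nonspace (l : List Char) (h : ¬ ∀ x ∈ l, x = ' ') :
    ∃ sp ch rest, l = sp ++ ch :: rest ∧ (∀ x ∈ sp, x = ' ') ∧ ch ≠ ' ' := by
  induction l with
  | nil => exact absurd (by simp) h
  | cons x xs ih =>
    by_cases hx : x = ' '
    · subst hx
      have h' : ¬ ∀ y ∈ xs, y = ' ' := by
        intro hall
        apply h
        intro y hy
        rcases List.mem_cons.mp hy with h1 | h1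
        · exact h1
        · exact hall y h1
      obtain ⟨sp, ch, rest, heq, hsp, hch⟩ := ih h'
      refine ⟨' ' :: sp, ch, rest, by simp [heq], ?_, hch⟩
      intro y hy
      rcases List.mem_cons.mp hy with h1 | h1
      · exact h1
      · exact hsp y h1
    · exact ⟨[], x, xs, rfl, by simp, hx⟩

lemma mem_chars (l : List Char) (y : Char) :
    y ∈ PySem.Set.discard (PySem.Set.ofList l) ' ' ↔ y ∈ l ∧ y ≠ ' ' := by
  simp [PySem.Set.discard, List.mem_filter, PySem.Set.mem_ofList]

lemma nodup_chars (l : List Char) : (PySem.Set.discard (PySem.Set.ofList l) ' ').Nodup := by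
  exact (PySem.Set.nodup_ofList l).filter _

-- the core equivalence: A's scan of a line equals B's distinct-character-set decision
lemma main_core (eol : Int) (l : List Char) :
    listLoop eol l [] =
      (match PySem.Set.discard (PySem.Set.ofList l) ' ' with
        | [] => (false, eol)
        | [ch] =>
          if ch = '*' ∨ ch = '_' ∨ ch = '-' then (decide (3 ≤ l.count ch), eol)
          else (false, -1)
        | _ => (false, -1)) := by
  by_cases h0 : ∀ x ∈ l, x = ' '
  · have hch : PySem.Set.discard (PySem.Set.ofList l) ' ' = [] := by
      apply List.eq_nil_iff_forall_not_mem.mpr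
      intro y hy
      rcases (mem_chars l y).mp hy with ⟨hyl, hys⟩
      exact hys (h0 y hyl)
    rw [hch]
    have : listLoop eol (l ++ []) [] = listLoop eol [] [] := listLoop_spaces eol l [] h0
    simpa [listLoop] using this
  · obtain ⟨sp, ch, rest, rfl, hsp, hch⟩ := exists_first_nonspace _ h0
    rw [listLoop_spaces eol sp (ch :: rest) hsp]
    by_cases huni : ∀ y ∈ sp ++ ch :: rest, y ≠ ' ' → y = ch
    · -- all non-space characters equal ch → chars = [ch]
      have hshape : PySem.Set.discard (PySem.Set.ofList (sp ++ ch :: rest)) ' ' = [ch] := by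
        apply nodup_singleton_of_all_eq (nodup_chars _) ch
        · exact (mem_chars _ ch).mpr ⟨by simp, hch⟩
        · intro y hy
          rcases (mem_chars _ y).mp hy with ⟨hyl, hys⟩
          exact huni y hyl hys
      rw [hshape]
      show listLoop eol (ch :: rest) [] =
        if ch = '*' ∨ ch = '_' ∨ ch = '-' then (decide (3 ≤ (sp ++ ch :: rest).count ch), eol)
        else (false, -1)
      have hcnt : (sp ++ ch :: rest).count ch = 1 + rest.count ch := by
        rw [List.count_append, List.count_cons_self,
            List.count_eq_zero.mpr (fun hmem => hch (hsp ch hmem))]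
        omega
      by_cases hval : ch = '*' ∨ ch = '_' ∨ ch = '-'
      · have hrest : ∀ y ∈ rest, y = ' ' ∨ y = ch := by
          intro y hy
          by_cases hys : y = ' '
          · left; exact hys
          · right; exact huni y (by simp [hy]) hys
        have h1 : listLoop eol (ch :: rest) [] = listLoop eol rest [ch] := by
          simp [listLoop, hval]
        have h2 := listLoop_repl eol ch hch rest 1 le_rfl
        rw [show List.replicate 1 ch = [ch] from rfl] at h2
        rw [h1, h2, if_pos hrest, if_pos hval, hcnt]
      · have h1 : listLoop eol (ch :: rest) [] = (false, -1) := by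
          simp only [listLoop, if_neg hval, if_neg hch]
        rw [h1, if_neg hval]
    · -- a second distinct non-space character exists → chars has ≥ 2 elements
      obtain ⟨y, hyl, hys, hyc⟩ : ∃ y ∈ sp ++ ch :: rest, y ≠ ' ' ∧ y ≠ ch := by
        by_contra hno
        apply huni
        intro y hy hys
        by_contra hyc
        exact hno ⟨y, hy, hys, hyc⟩
      have hy1 : y ∈ PySem.Set.discard (PySem.Set.ofList (sp ++ ch :: rest)) ' ' :=
        (mem_chars _ y).mpr ⟨hyl, hys⟩
      have hy2 : ch ∈ PySem.Set.discard (PySem.Set.ofList (sp ++ ch :: rest)) ' ' :=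
        (mem_chars _ ch).mpr ⟨by simp, hch⟩
      have hyrest : y ∈ rest := by
        rcases List.mem_append.mp hyl with h1 | h1
        · exact absurd (hsp y h1) hys
        · rcases List.mem_cons.mp h1 with h2 | h2
          · exact absurd h2 hyc
          · exact h2
      obtain ⟨a, b, t, hshape⟩ : ∃ a b t,
          PySem.Set.discard (PySem.Set.ofList (sp ++ ch :: rest)) ' ' = a :: b :: t := by
        match hm : PySem.Set.discard (PySem.Set.ofList (sp ++ ch :: rest)) ' ' with
        | [] => rw [hm] at hy1; cases hy1
        | [z] =>
          rw [hm] at hy1 hy2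
          simp at hy1 hy2
          exact absurd (hy1.trans hy2.symm) hyc
        | a :: b :: t => exact ⟨a, b, t, rfl⟩
      rw [hshape]
      show listLoop eol (ch :: rest) [] = (false, -1)
      have hnotall : ¬ ∀ z ∈ rest, z = ' ' ∨ z = ch := by
        intro h
        rcases h y hyrest with h' | h'
        · exact hys h'
        · exact hyc h' 
      by_cases hval : ch = '*' ∨ ch = '_' ∨ ch = '-'
      · have h1 : listLoop eol (ch :: rest) [] = listLoop eol rest [ch] := by
          simp [listLoop, hval]
        have h2 := listLoop_repl eol ch hch rest 1 le_rfl
        rw [show List.replicate 1 ch = [ch] from rfl] at h2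
        rw [h1, h2, if_neg hnotall]
      · simp only [listLoop, if_neg hval, if_neg hch]

-- ===== VERDICT (by name: the statement is the Claim_ definition above) =====
theorem check_hr_spec : Claim_equal_check_hr := by
  intro md start _ hpre
  have hpre' : (0 : Int) ≤ start := hpre
  obtain ⟨k, rfl⟩ : ∃ k : Nat, start = (k : Int) := ⟨start.toNat, by omega⟩
  unfold Spec_check_hr check_hr check_hr_alt
  simp only [PySem.Str.findFrom, PySem.Str.len_eq]
  by_cases hk : k ≤ md.toList.length
  · -- start within the string: the found '\n' (or the end of md) bounds the scanned line
    obtain ⟨e, heol, hke, hen⟩ : ∃ e : Nat,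
        (if PySem.Chars.findFrom md.toList "\n".toList (k : Int) none ≠ -1
          then PySem.Chars.findFrom md.toList "\n".toList (k : Int) none
          else (md.toList.length : Int)) = (e : Int) ∧ k ≤ e ∧ e ≤ md.toList.length := by
      by_cases hcm : PySem.Chars.findFrom md.toList "\n".toList (k : Int) none = -1
      · exact ⟨md.toList.length, if_neg (fun h => h hcm), hk, le_rfl⟩
      · obtain ⟨hle, hpref, _⟩ :=
          PySem.Chars.findFrom_natCast_spec md.toList "\n".toList k hk hcm
        have hlt : (PySem.Chars.findFrom md.toList "\n".toList (k : Int) none).toNat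
            < md.toList.length := by
          by_contra hge
          have hnil : md.toList.drop
              (PySem.Chars.findFrom md.toList "\n".toList (k : Int) none).toNat = [] :=
            List.drop_eq_nil_of_le (by omega)
          rw [hnil] at hpref
          simp [List.prefix_nil] at hpref
        exact ⟨(PySem.Chars.findFrom md.toList "\n".toList (k : Int) none).toNat,
          by rw [if_pos hcm]; omega, by omega, by omega⟩
    rw [heol, show ((e : Int) - (k : Int)).toNat = e - k from by omega,
        loopA_eq_listLoop md.toList (e : Int) (e - k) (k : Int) [] (by omega) (by omega),
        PySem.List.slice_natCast, show ((k : Int)).toNat = k from by omega]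
    exact main_core (e : Int) ((md.toList.drop k).take (e - k))
  · -- start past the end of the string: find returns -1 and the scanned line is empty
    have hcm : PySem.Chars.findFrom md.toList "\n".toList (k : Int) none = -1 := by
      simp only [PySem.Chars.findFrom]
      rw [if_neg (by omega : ¬ (k : Int) < 0),
          if_pos (by omega : ((md.toList.length : Int)) < (k : Int))]
    rw [hcm]
    simp only [ne_eq, not_true_eq_false, if_false]
    rw [show ((md.toList.length : Int) - (k : Int)).toNat = 0 from by omega,
        PySem.List.slice_natCast]
    have hempty : (md.toList.drop k).take (md.toList.length - k) = [] := by
      rw [List.drop_eq_nil_of_le (by omega)]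
      simp
    rw [hempty]
    simp [checkHrLoopA, PySem.Set.ofList, PySem.Set.empty, PySem.Set.discard]
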